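-- pv_equiv track=rewrite | github.com/GrapeDiget/Baekjoon_Online_Judge | problems/8958 OX퀴즈/24999307 맞았습니다!! 28776 KB 76 ms.py | solve
-- ===== SOURCE A (Python) =====
-- def solve(string):
--     pnt = 0
--     combo = 0
--     for j in string:
--         if j == 'O':
--             pnt += 1 + combo
--             combo += 1
--         else:
--             combo = 0
--     return pnt
-- ===== SOURCE B (Python) =====
-- def solve(string):
--     total = 0
--     i = 0
--     n = len(string)
--     while i < n:
--         if string[i] == 'O':
--             j = i + 1
--             while j < n and string[j] == 'O':
--                 j += 1
--             k = j - i
--             total += k * (k + 1) // 2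
--             i = j
--         else:
--             i += 1
--     return total
-- ===== Notes on version B (the rewrite author's own statement) =====
-- stated objective: alternative
-- what changed: B scans maximal runs of consecutive correct answers and adds the closed-form triangular number k*(k+1)//2 per run, instead of A's per-character combo accumulator.
import Mathlib
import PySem

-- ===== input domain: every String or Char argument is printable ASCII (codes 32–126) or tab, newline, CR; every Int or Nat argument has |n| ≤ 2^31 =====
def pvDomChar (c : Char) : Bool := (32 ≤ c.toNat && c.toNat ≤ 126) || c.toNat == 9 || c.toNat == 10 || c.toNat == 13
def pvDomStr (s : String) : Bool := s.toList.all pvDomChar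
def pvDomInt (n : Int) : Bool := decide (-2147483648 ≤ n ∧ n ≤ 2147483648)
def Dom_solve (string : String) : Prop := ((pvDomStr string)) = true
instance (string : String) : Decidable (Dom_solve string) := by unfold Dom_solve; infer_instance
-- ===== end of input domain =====

-- B replaces A's per-character combo accumulator by a scan over maximal 'O'-runs with the
-- closed-form triangular number per run (objective: alternative, same O(n) cost).

-- ===== PORT A =====
-- the loop body of A, on state (pnt, combo)
def aStep (s : Int × Int) (j : Char) : Int × Int :=
  if j = 'O' then (s.1 + 1 + s.2, s.2 + 1) else (s.1, 0)

def solve (string : String) : Int :=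
  (string.toList.foldl aStep (0, 0)).1

-- ===== PORT B =====
-- B's outer while-loop: at a non-'O' step forward; at an 'O' scan the whole run
-- (takeWhile/dropWhile = the inner `while j < n and string[j] == 'O'` scan) and add k*(k+1)//2.
def altGo : List Char → Int
  | [] => 0
  | c :: rest =>
    if c = 'O' then
      let k : Int := ((rest.takeWhile (fun x => x == 'O')).length : Int) + 1
      PySem.Int.floordiv (k * (k + 1)) 2 + altGo (rest.dropWhile (fun x => x == 'O'))
    else altGo rest
termination_by l => l.length
decreasing_by
  · simpa using Nat.lt_succ_of_le (List.length_dropWhile_le _ _)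
  · simp

def solve_alt (string : String) : Int := altGo string.toList

-- ===== PRECONDITION & SPEC =====
def Spec_solve (string : String) (out : Int) : Prop := out = solve_alt string
instance (string : String) (out : Int) : Decidable (Spec_solve string out) := by unfold Spec_solve; infer_instance

-- ===== CLAIM (what is proved, stated in full; the proofs are below) =====
def Claim_equal_solve : Prop := ∀ (string : String), Dom_solve string → Spec_solve string (solve string)

-- ===== LEMMAS AND PROOFS =====

-- triangular numbers, recursively
def T : Nat → Int
  | 0 => 0
  | k + 1 => T k + (k + 1)

theorem two_mul_T (k : Nat) : (k : Int) * ((k : Int) + 1) = 2 * T k := by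
  induction k with
  | zero => simp [T]
  | succ n ih => simp only [T]; push_cast; push_cast at ih; nlinarith

theorem tri_closed (k : Nat) : PySem.Int.floordiv ((k : Int) * ((k : Int) + 1)) 2 = T k := by
  rw [PySem.Int.floordiv_eq_ediv_of_pos (by norm_num), two_mul_T]
  exact Int.mul_ediv_cancel_left _ (by norm_num)

theorem fold_run (run : List Char) (h : ∀ x ∈ run, x = 'O') (p c : Int) :
    run.foldl aStep (p, c) = (p + run.length * c + T run.length, c + run.length) := by
  induction run generalizing p c with
  | nil => simp [T]
  | cons x xs ih =>
    have hx : x = 'O' := h x (by simp)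
    have hxs : ∀ y ∈ xs, y = 'O' := fun y hy => h y (by simp [hy])
    simp only [List.foldl_cons, aStep, hx, if_pos, ih hxs, List.length_cons, T,
      Prod.mk.injEq]
    refine ⟨?_, ?_⟩ <;> (simp; ring)

theorem main_fuel (n : Nat) : ∀ (l : List Char), l.length ≤ n → ∀ p : Int,
    (l.foldl aStep (p, 0)).1 = p + altGo l := by
  induction n with
  | zero =>
    intro l hl p
    have : l = [] := List.eq_nil_of_length_eq_zero (Nat.le_zero.mp hl)
    subst this; simp [altGo]
  | succ n ihn =>
    intro l hl p
    match l with
    | [] => simp [altGo]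
    | c :: rest =>
      have hrl : rest.length ≤ n := by simpa using hl
      by_cases hc : c = 'O'
      · have hall : ∀ x ∈ rest.takeWhile (fun x => x == 'O'), x = 'O' := by
          intro x hx; simpa using List.mem_takeWhile_imp hx
        have key : (c :: rest).foldl aStep (p, 0)
            = (rest.dropWhile (fun x => x == 'O')).foldl aStep
                ((rest.takeWhile (fun x => x == 'O')).foldl aStep (p + 1, 1)) := by
          have hsplit : rest.takeWhile (fun x => x == 'O') ++ rest.dropWhile (fun x => x == 'O')
              = rest := List.takeWhile_append_dropWhile
          calc (c :: rest).foldl aStep (p, 0) = rest.foldl aStep (p + 1, 1) := by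
                simp [aStep, hc]
            _ = ((rest.takeWhile (fun x => x == 'O')
                  ++ rest.dropWhile (fun x => x == 'O'))).foldl aStep (p + 1, 1) := by rw [hsplit]
            _ = _ := List.foldl_append
        have h2 := fold_run (rest.takeWhile (fun x => x == 'O')) hall (p + 1) 1
        have haltc : altGo (c :: rest) =
            PySem.Int.floordiv ((((rest.takeWhile (fun x => x == 'O')).length : Int) + 1)
              * ((((rest.takeWhile (fun x => x == 'O')).length : Int) + 1) + 1)) 2
            + altGo (rest.dropWhile (fun x => x == 'O')) := by
          simp only [altGo, hc, if_pos]
        have htri : PySem.Int.floordiv ((((rest.takeWhile (fun x => x == 'O')).length : Int) + 1)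
              * ((((rest.takeWhile (fun x => x == 'O')).length : Int) + 1) + 1)) 2
            = T ((rest.takeWhile (fun x => x == 'O')).length + 1) := by
          have := tri_closed ((rest.takeWhile (fun x => x == 'O')).length + 1)
          push_cast at this ⊢
          convert this using 2
        match hd : rest.dropWhile (fun x => x == 'O') with
        | [] =>
          rw [key, hd, List.foldl_nil, h2, haltc, hd, htri]
          simp [altGo, T]; ring
        | d :: t =>
          have hdO : d ≠ 'O' := by
            have hne : rest.dropWhile (fun x => x == 'O') ≠ [] := by rw [hd]; simp
            have := List.head_dropWhile_not (fun x => x == 'O') hne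
            simp only [hd, List.head_cons] at this; simpa using this
          have hlen : t.length ≤ n := by
            have h1 : (rest.dropWhile (fun x => x == 'O')).length ≤ rest.length :=
              List.length_dropWhile_le _ _
            rw [hd] at h1; simp at h1; omega
          have h3 : (d :: t).foldl aStep
              (p + 1 + (rest.takeWhile (fun x => x == 'O')).length * 1
                + T (rest.takeWhile (fun x => x == 'O')).length,
               1 + (rest.takeWhile (fun x => x == 'O')).length)
              = t.foldl aStep (p + 1 + (rest.takeWhile (fun x => x == 'O')).length * 1
                + T (rest.takeWhile (fun x => x == 'O')).length, 0) := by
            simp [aStep, hdO]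
          have ih := ihn t hlen (p + 1 + (rest.takeWhile (fun x => x == 'O')).length * 1
                + T (rest.takeWhile (fun x => x == 'O')).length)
          rw [key, hd, h2, h3, ih, haltc, hd, htri]
          simp only [altGo, hdO, T]
          simp; ring
      · have h1 : (c :: rest).foldl aStep (p, 0) = rest.foldl aStep (p, 0) := by
          simp [aStep, hc]
        rw [h1, ihn rest hrl p]
        simp [altGo, hc]

-- ===== VERDICT (by name: the statement is the Claim_ definition above) =====
theorem solve_spec : Claim_equal_solve := by
  intro string _
  unfold Spec_solve solve solve_alt
  simpa using main_fuel string.toList.length string.toList le_rfl 0
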